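-- pv_equiv track=rewrite | github.com/tesolchina/smartLessons | operating/PyScripts/lc_ai_document_analyzer.py | categorize_ai_mentions
-- ===== SOURCE A (Python) =====
-- def categorize_ai_mentions(ai_mentions):
--     """Categorize AI mentions by section and type"""
--     categories = {
--         'ai_competency_development': [],
--         'ai_assisted_learning': [],
--         'ai_assessment': [],
--         'ai_training_development': [],
--         'ai_tools_integration': [],
--         'ai_policy_strategy': []
--     }
--
--     for mention in ai_mentions:
--         context_lower = mention['context'].lower()
--
--         if any(word in context_lower for word in ['competency', 'competence', 'skill']):
--             categories['ai_competency_development'].append(mention)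
--         elif any(word in context_lower for word in ['assessment', 'evaluate', 'grading']):
--             categories['ai_assessment'].append(mention)
--         elif any(word in context_lower for word in ['training', 'workshop', 'development']):
--             categories['ai_training_development'].append(mention)
--         elif any(word in context_lower for word in ['tool', 'platform', 'technology']):
--             categories['ai_tools_integration'].append(mention)
--         elif any(word in context_lower for word in ['policy', 'strategy', 'task force']):
--             categories['ai_policy_strategy'].append(mention)
--         else:
--             categories['ai_assisted_learning'].append(mention)
--
--     return categories
-- ===== SOURCE B (Python) =====
-- RULES = [
--     ('ai_competency_development', ('competency', 'competence', 'skill')),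
--     ('ai_assessment', ('assessment', 'evaluate', 'grading')),
--     ('ai_training_development', ('training', 'workshop', 'development')),
--     ('ai_tools_integration', ('tool', 'platform', 'technology')),
--     ('ai_policy_strategy', ('policy', 'strategy', 'task force')),
-- ]
--
-- KEYS = ['ai_competency_development', 'ai_assisted_learning', 'ai_assessment',
--         'ai_training_development', 'ai_tools_integration', 'ai_policy_strategy']
--
--
-- def _classify(mention):
--     context = mention['context'].lower()
--     for key, words in RULES:
--         if any(word in context for word in words):
--             return key
--     return 'ai_assisted_learning'
--
--
-- def categorize_ai_mentions(ai_mentions):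
--     """Categorize AI mentions by section and type"""
--     return {key: [m for m in ai_mentions if _classify(m) == key] for key in KEYS}
-- ===== Notes on version B (the rewrite author's own statement) =====
-- stated objective: simpler
-- what changed: Replaces the six-way if-elif loop that mutates a dict with a table-driven first-match classifier plus a per-key filter comprehension that builds the result dict directly.
import Mathlib
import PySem

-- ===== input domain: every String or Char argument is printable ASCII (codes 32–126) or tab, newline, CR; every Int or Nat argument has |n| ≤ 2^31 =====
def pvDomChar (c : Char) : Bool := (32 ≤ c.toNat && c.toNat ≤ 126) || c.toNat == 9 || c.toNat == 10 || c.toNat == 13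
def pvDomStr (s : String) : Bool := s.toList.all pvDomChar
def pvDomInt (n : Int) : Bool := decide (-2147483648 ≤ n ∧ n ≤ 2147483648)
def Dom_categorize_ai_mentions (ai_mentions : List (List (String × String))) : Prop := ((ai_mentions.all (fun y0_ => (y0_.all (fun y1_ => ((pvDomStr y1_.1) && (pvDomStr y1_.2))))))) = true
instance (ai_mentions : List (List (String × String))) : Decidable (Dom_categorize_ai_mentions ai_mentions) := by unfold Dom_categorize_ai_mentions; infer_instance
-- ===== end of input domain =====

-- B replaces A's six-way if-elif loop mutating a dict by a table-driven first-match
-- classifier plus one filter per output key (simpler decomposition; same cost).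

-- ===== PORT A =====
-- mention['context'] : first-match lookup in the association list; Pre_ guarantees the
-- key is present (Python raises KeyError otherwise), so the `.getD ""` default is never used.
def pvCtx (m : List (String × String)) : String :=
  ((PySem.Dict.mk m).get? "context").getD ""

def pvStepA (d : PySem.Dict String (List (List (String × String))))
    (mention : List (String × String)) : PySem.Dict String (List (List (String × String))) :=
  let context_lower := PySem.Str.lower (pvCtx mention)
  if ["competency", "competence", "skill"].any (fun w => PySem.Str.isIn w context_lower) then
    d.modify "ai_competency_development" [] (· ++ [mention])
  else if ["assessment", "evaluate", "grading"].any (fun w => PySem.Str.isIn w context_lower) then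
    d.modify "ai_assessment" [] (· ++ [mention])
  else if ["training", "workshop", "development"].any (fun w => PySem.Str.isIn w context_lower) then
    d.modify "ai_training_development" [] (· ++ [mention])
  else if ["tool", "platform", "technology"].any (fun w => PySem.Str.isIn w context_lower) then
    d.modify "ai_tools_integration" [] (· ++ [mention])
  else if ["policy", "strategy", "task force"].any (fun w => PySem.Str.isIn w context_lower) then
    d.modify "ai_policy_strategy" [] (· ++ [mention])
  else
    d.modify "ai_assisted_learning" [] (· ++ [mention])

def categorize_ai_mentions (ai_mentions : List (List (String × String))) :
    List (String × List (List (String × String))) :=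
  let categories : PySem.Dict String (List (List (String × String))) :=
    PySem.Dict.mk [("ai_competency_development", []), ("ai_assisted_learning", []),
                   ("ai_assessment", []), ("ai_training_development", []),
                   ("ai_tools_integration", []), ("ai_policy_strategy", [])]
  (ai_mentions.foldl pvStepA categories).items

-- ===== PORT B =====
def pvRules : List (String × List String) :=
  [("ai_competency_development", ["competency", "competence", "skill"]),
   ("ai_assessment", ["assessment", "evaluate", "grading"]),
   ("ai_training_development", ["training", "workshop", "development"]),
   ("ai_tools_integration", ["tool", "platform", "technology"]),
   ("ai_policy_strategy", ["policy", "strategy", "task force"])]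

def pvKeys : List String :=
  ["ai_competency_development", "ai_assisted_learning", "ai_assessment",
   "ai_training_development", "ai_tools_integration", "ai_policy_strategy"]

def pvClassify (mention : List (String × String)) : String :=
  let context := PySem.Str.lower (((PySem.Dict.mk mention).get? "context").getD "")
  match pvRules.find? (fun r => r.2.any (fun w => PySem.Str.isIn w context)) with
  | some r => r.1
  | none => "ai_assisted_learning"

-- the dict comprehension iterates the six distinct literal keys in order, so its
-- items list (insertion order) is exactly this map
def categorize_ai_mentions_alt (ai_mentions : List (List (String × String))) :
    List (String × List (List (String × String))) :=
  pvKeys.map (fun key => (key, ai_mentions.filter (fun m => pvClassify m == key)))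

-- ===== PRECONDITION & SPEC =====
-- Pre_ excludes exactly the mentions without a 'context' key, on which Python A raises KeyError.
def Pre_categorize_ai_mentions (ai_mentions : List (List (String × String))) : Prop :=
  (ai_mentions.all (fun m => m.any (fun p => p.1 == "context"))) = true
instance (ai_mentions : List (List (String × String))) : Decidable (Pre_categorize_ai_mentions ai_mentions) := by unfold Pre_categorize_ai_mentions; infer_instance

def pvWitness_categorize_ai_mentions : (List (List (String × String))) :=
  [[("context", "AI skill building")], [("context", "a new policy")]]

def Spec_categorize_ai_mentions (ai_mentions : List (List (String × String))) (out : List (String × List (List (String × String)))) : Prop := out = categorize_ai_mentions_alt ai_mentions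
instance (ai_mentions : List (List (String × String))) (out : List (String × List (List (String × String)))) : Decidable (Spec_categorize_ai_mentions ai_mentions out) := by unfold Spec_categorize_ai_mentions; infer_instance

-- ===== CLAIM (what is proved, stated in full; the proofs are below) =====
def Claim_equal_categorize_ai_mentions : Prop := ∀ (ai_mentions : List (List (String × String))), Dom_categorize_ai_mentions ai_mentions → Pre_categorize_ai_mentions ai_mentions → Spec_categorize_ai_mentions ai_mentions (categorize_ai_mentions ai_mentions)

-- ===== LEMMAS AND PROOFS =====

-- A's if-elif step is the modify at the key B's classifier computes
lemma pvStepA_eq (d : PySem.Dict String (List (List (String × String))))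
    (m : List (String × String)) :
    pvStepA d m = d.modify (pvClassify m) [] (· ++ [m]) := by
  unfold pvStepA pvClassify pvCtx pvRules
  simp only [List.any_cons, List.any_nil, Bool.or_false, List.find?]
  split_ifs with h1 h2 h3 h4 h5 <;> simp_all only [Bool.not_eq_true]

-- B's classifier always lands in one of the six keys
lemma pvClassify_mem (m : List (String × String)) : pvClassify m ∈ pvKeys := by
  unfold pvClassify
  rcases h : pvRules.find? (fun r => r.2.any (fun w => PySem.Str.isIn w
      (PySem.Str.lower (((PySem.Dict.mk m).get? "context").getD "")))) with _ | r
  · simp only [h]; simp [pvKeys]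
  · simp only [h]
    have := List.mem_of_find?_eq_some h
    fin_cases this <;> simp [pvKeys]

-- ===== VERDICT (by name: the statement is the Claim_ definition above) =====
theorem categorize_ai_mentions_spec : Claim_equal_categorize_ai_mentions := by
  intro l _ _
  unfold Spec_categorize_ai_mentions categorize_ai_mentions categorize_ai_mentions_alt
  have hstep : ∀ init : PySem.Dict String (List (List (String × String))),
      l.foldl pvStepA init
        = (l.map (fun m => (pvClassify m, m))).foldl
            (fun d p => d.modify p.1 [] (· ++ [p.2])) init := by
    intro init
    rw [List.foldl_map]
    exact PySem.List.foldl_congr_mem l _ _ init (fun d m _ => pvStepA_eq d m)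
  simp only [hstep]
  have hnd : ((l.map (fun m => (pvClassify m, m))).foldl
      (fun (d : PySem.Dict String (List (List (String × String))))
           (p : String × List (String × String)) => d.modify p.1 [] (· ++ [p.2]))
      (PySem.Dict.mk [("ai_competency_development", []), ("ai_assisted_learning", []),
                      ("ai_assessment", []), ("ai_training_development", []),
                      ("ai_tools_integration", []), ("ai_policy_strategy", [])])).keys.Nodup :=
    PySem.Dict.nodup_keys_foldl_modify_key (l.map (fun m => (pvClassify m, m)))
      (fun p => p.1) [] (fun _ p => (· ++ [p.2])) _ (by decide)
  rw [PySem.Dict.items_eq_map_keys _ hnd []]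
  rw [PySem.Dict.keys_foldl_modify_key (l.map (fun m => (pvClassify m, m)))
      (fun p => p.1) [] (fun _ p => (· ++ [p.2]))]
  have hkeys : PySem.Set.update
      (PySem.Dict.mk (κ := String) (ν := List (List (String × String)))
        [("ai_competency_development", []), ("ai_assisted_learning", []),
         ("ai_assessment", []), ("ai_training_development", []),
         ("ai_tools_integration", []), ("ai_policy_strategy", [])]).keys
      ((l.map (fun m => (pvClassify m, m))).map (fun p => p.1)) = pvKeys := by
    rw [PySem.Set.update_eq_append_filter]
    have hfil : List.filter
        (fun y => !(PySem.Set.contains (PySem.Dict.mk (κ := String) (ν := List (List (String × String)))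
          [("ai_competency_development", []), ("ai_assisted_learning", []),
           ("ai_assessment", []), ("ai_training_development", []),
           ("ai_tools_integration", []), ("ai_policy_strategy", [])]).keys y))
        (PySem.Set.ofList ((l.map (fun m => (pvClassify m, m))).map (fun p => p.1))) = [] := by
      rw [List.filter_eq_nil_iff]
      intro y hy
      have hy' : y ∈ (l.map (fun m => (pvClassify m, m))).map (fun p => p.1) :=
        (PySem.Set.mem_ofList _ _).mp hy
      simp only [List.map_map, List.mem_map, Function.comp] at hy'
      obtain ⟨m, _, rfl⟩ := hy'
      have := pvClassify_mem m
      simp only [pvKeys, List.mem_cons, List.not_mem_nil, or_false] at this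
      rcases this with h | h | h | h | h | h <;> simp [h]
    rw [hfil]
    simp [pvKeys]
  rw [hkeys]
  refine List.map_congr_left (fun k hk => ?_)
  rw [PySem.Dict.getD_foldl_modify_append]
  have hinit : (PySem.Dict.mk (κ := String) (ν := List (List (String × String)))
      [("ai_competency_development", []), ("ai_assisted_learning", []),
       ("ai_assessment", []), ("ai_training_development", []),
       ("ai_tools_integration", []), ("ai_policy_strategy", [])]).getD k [] = [] := by
    simp only [pvKeys, List.mem_cons, List.not_mem_nil, or_false] at hk
    rcases hk with h | h | h | h | h | h <;> subst h <;> decide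
  rw [hinit]
  simp [List.filter_map, Function.comp_def]
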